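-- pv_equiv track=rewrite | github.com/ramonserranoprofile/coder_byte | coderbyte/easy/question_marks.py | QuestionsMarks
-- ===== SOURCE A (Python) =====
-- def QuestionsMarks(strParam):
--     last_number = None
--
--     question_count = 0
--
--     valid_pair_found = False
--
--     for char in strParam:
--         if char.isdigit():
--             current_number = int(char)
--             if last_number is not None and last_number + current_number == 10:
--
--                 if question_count == 3:
--                     valid_pair_found = True
--                 else:
--                     return "false"
--
--             last_number = current_number
--             question_count = 0
--         elif char == "?":
--             question_count += 1
--
--     return "true" if valid_pair_found else "false"
-- ===== SOURCE B (Python) =====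
-- def QuestionsMarks(strParam):
--     digits = [(int(c), i) for i, c in enumerate(strParam) if c.isdigit()]
--     checks = [strParam[i + 1:j].count("?") == 3
--               for (a, i), (b, j) in zip(digits, digits[1:]) if a + b == 10]
--     return "true" if checks and all(checks) else "false"
-- ===== Notes on version B (the rewrite author's own statement) =====
-- stated objective: alternative
-- what changed: Replaces A's single streaming scan with a running question-mark counter and early return by a two-phase pass: first collect the list of (digit value, index) pairs, then for each adjacent digit pair summing to 10 count the question marks in the slice between the two indices and require every such count to be 3 and at least one such pair to exist.
import Mathlib
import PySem

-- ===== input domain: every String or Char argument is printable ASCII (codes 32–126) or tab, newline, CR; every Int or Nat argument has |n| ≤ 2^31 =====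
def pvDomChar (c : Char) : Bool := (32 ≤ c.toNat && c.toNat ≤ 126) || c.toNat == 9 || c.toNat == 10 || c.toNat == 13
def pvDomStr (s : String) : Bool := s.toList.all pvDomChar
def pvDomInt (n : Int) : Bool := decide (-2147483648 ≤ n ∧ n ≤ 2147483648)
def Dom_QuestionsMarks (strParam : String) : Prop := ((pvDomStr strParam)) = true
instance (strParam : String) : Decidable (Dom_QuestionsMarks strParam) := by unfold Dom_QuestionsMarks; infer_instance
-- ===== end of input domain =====

-- B replaces A's one-pass streaming counter by a digit-index-collecting pass plus a pairwise
-- slice-counting pass over adjacent digit pairs (alternative decomposition, same behaviour).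

-- ===== PORT A =====
-- the for-loop of A, state (last_number, question_count, valid_pair_found); early 'return "false"' kept
def pvA_loop : List Char → Option Int → Int → Bool → String
  | [], _, _, valid => if valid then "true" else "false"
  | c :: cs, last, q, valid =>
    if PySem.Chars.isdigit c then
      -- int(char): the branch guard makes the char a digit, so ofChars? is always 'some'
      let cur : Int := (PySem.Int.ofChars? [c]).getD 0
      match last with
      | some l =>
        if l + cur = 10 then
          if q = 3 then pvA_loop cs (some cur) 0 true else "false"
        else pvA_loop cs (some cur) 0 valid
      | none => pvA_loop cs (some cur) 0 valid
    else if c = '?' then pvA_loop cs last (q + 1) valid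
    else pvA_loop cs last q valid

def QuestionsMarks (strParam : String) : String :=
  pvA_loop strParam.toList none 0 false

-- ===== PORT B =====
def QuestionsMarks_alt (strParam : String) : String :=
  -- digits = [(int(c), i) for i, c in enumerate(strParam) if c.isdigit()]
  let digits : List (Int × Int) :=
    ((PySem.List.enumerate strParam.toList 0).filter (fun p => PySem.Chars.isdigit p.2)).map
      (fun p => ((PySem.Int.ofChars? [p.2]).getD 0, p.1))
  -- checks = [strParam[i+1:j].count("?") == 3 for (a,i),(b,j) in zip(digits, digits[1:]) if a+b == 10]
  let checks : List Bool :=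
    ((digits.zip digits.tail).filter (fun pq => pq.1.1 + pq.2.1 == 10)).map
      (fun pq => PySem.Chars.count
        (PySem.List.slice strParam.toList (some (pq.1.2 + 1)) (some pq.2.2)) ['?'] == 3)
  -- return "true" if checks and all(checks) else "false"
  if !checks.isEmpty && checks.all id then "true" else "false"

-- ===== PRECONDITION & SPEC =====
def Spec_QuestionsMarks (strParam : String) (out : String) : Prop := out = QuestionsMarks_alt strParam
instance (strParam : String) (out : String) : Decidable (Spec_QuestionsMarks strParam out) := by unfold Spec_QuestionsMarks; infer_instance

-- ===== CLAIM (what is proved, stated in full; the proofs are below) =====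
def Claim_equal_QuestionsMarks : Prop := ∀ (strParam : String), Dom_QuestionsMarks strParam → Spec_QuestionsMarks strParam (QuestionsMarks strParam)

-- ===== LEMMAS AND PROOFS =====

-- the digit value of a character, as both ports compute it
def pvVal (c : Char) : Int := (PySem.Int.ofChars? [c]).getD 0

-- the sequence of (digit value, number of '?' since the previous digit) entries of a string,
-- given the count of '?' seen so far
def pvGaps : List Char → Int → List (Int × Int)
  | [], _ => []
  | c :: cs, q =>
    if PySem.Chars.isdigit c then (pvVal c, q) :: pvGaps cs 0
    else if c = '?' then pvGaps cs (q + 1)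
    else pvGaps cs q

-- A's verdict, recomputed on the pvGaps entries
def pvCheck : Option Int → List (Int × Int) → Bool → String
  | last, [], valid => match last with | _ => if valid then "true" else "false"
  | last, (d, q) :: es, valid =>
    match last with
    | some l =>
      if l + d = 10 then
        if q = 3 then pvCheck (some d) es true else "false"
      else pvCheck (some d) es valid
    | none => pvCheck (some d) es valid

-- the '?'-counts of the sum-to-10 adjacent digit pairs (with an optional pending previous digit)
def pvQs : Option Int → List (Int × Int) → List Int
  | _, [] => []
  | none, (d, _) :: es => pvQs (some d) es
  | some l, (d, q) :: es =>
    if l + d = 10 then q :: pvQs (some d) es else pvQs (some d) es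

-- B's first pass, on a suffix starting at index s
def pvDigits (cs : List Char) (s : Int) : List (Int × Int) :=
  ((PySem.List.enumerate cs s).filter (fun p => PySem.Chars.isdigit p.2)).map
    (fun p => (pvVal p.2, p.1))

-- B's second pass over a given digit list, slices taken in cs0
def pvChecks (cs0 : List Char) (ds : List (Int × Int)) : List Bool :=
  ((ds.zip ds.tail).filter (fun pq => pq.1.1 + pq.2.1 == 10)).map
    (fun pq => PySem.Chars.count
      (PySem.List.slice cs0 (some (pq.1.2 + 1)) (some pq.2.2)) ['?'] == 3)

lemma pvDigits_nil (s : Int) : pvDigits [] s = [] := by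
  simp [pvDigits, PySem.List.enumerate_nil]

lemma pvDigits_cons (c : Char) (cs : List Char) (s : Int) :
    pvDigits (c :: cs) s =
      if PySem.Chars.isdigit c then (pvVal c, s) :: pvDigits cs (s + 1) else pvDigits cs (s + 1) := by
  simp only [pvDigits, PySem.List.enumerate_cons, List.filter_cons]
  by_cases h : PySem.Chars.isdigit c <;> simp [h]

lemma go_count (x : Char) : ∀ (fuel : Nat) (s : List Char) (acc : Nat), s.length ≤ fuel →
    PySem.Chars.count.go [x] fuel s acc = acc + s.count x := by
  intro fuel
  induction fuel with
  | zero => intro s acc h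
            have : s = [] := List.eq_nil_of_length_eq_zero (Nat.le_zero.mp h)
            subst this; simp [PySem.Chars.count.go]
  | succ n ih =>
    intro s acc h
    cases s with
    | nil => simp [PySem.Chars.count.go]
    | cons c cs =>
      simp only [PySem.Chars.count.go]
      have hlt : cs.length ≤ n := by simpa using Nat.le_of_succ_le_succ h
      by_cases hc : x = c
      · subst hc
        rw [if_pos (by simp)]
        simp only [List.length, List.drop]
        rw [ih _ _ hlt, List.count_cons]
        simp; omega
      · rw [if_neg (by simpa using hc)]
        rw [ih _ _ hlt, List.count_cons, if_neg (by simp; exact fun h' => hc h'.symm)]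
        simp

lemma count_single (seg : List Char) (x : Char) : PySem.Chars.count seg [x] = seg.count x := by
  simp only [PySem.Chars.count]
  rw [if_neg (by simp), go_count x seg.length seg 0 le_rfl]
  simp

-- L1: A's loop factors through pvGaps
lemma loop_eq_check : ∀ (cs : List Char) (last : Option Int) (q : Int) (valid : Bool),
    pvA_loop cs last q valid = pvCheck last (pvGaps cs q) valid := by
  intro cs
  induction cs with
  | nil => intro last q valid; cases last <;> simp [pvA_loop, pvGaps, pvCheck]
  | cons c cs ih =>
    intro last q valid
    by_cases hd : PySem.Chars.isdigit c
    · cases last with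
      | none => simp [pvA_loop, pvGaps, hd, pvCheck, pvVal, ih]
      | some l =>
        simp only [pvA_loop, pvGaps, hd, if_pos, pvCheck, pvVal]
        by_cases h10 : l + (PySem.Int.ofChars? [c]).getD 0 = 10
        · by_cases h3 : q = 3 <;> simp [h10, h3, ih]
        · simp [h10, ih]
    · by_cases hq : c = '?'
      · subst hq
        simp [pvA_loop, pvGaps, ih, (by decide : PySem.Chars.isdigit '?' = false)]
      · simp [pvA_loop, pvGaps, hd, hq, ih]

-- L2: pvCheck is the all/nonempty verdict over pvQs
lemma check_eq_qs : ∀ (es : List (Int × Int)) (last : Option Int) (valid : Bool),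
    pvCheck last es valid =
      if (valid || !(pvQs last es).isEmpty) && (pvQs last es).all (· == 3) then "true" else "false" := by
  intro es
  induction es with
  | nil => intro last valid; cases last <;> cases valid <;> simp [pvCheck, pvQs]
  | cons e es ih =>
    intro last valid
    obtain ⟨d, q⟩ := e
    cases last with
    | none => simp [pvCheck, pvQs, ih]
    | some l =>
      by_cases h10 : l + d = 10
      · by_cases h3 : q = 3
        · simp [pvCheck, pvQs, h10, h3, ih]
        · simp [pvCheck, pvQs, h10, h3]
      · simp [pvCheck, pvQs, h10, ih]

-- the next character of the original list extends a between-digits take by itself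
lemma take_extend (l : List Char) (rest : List Char) (a b : Nat) (c : Char) (hab : a ≤ b)
    (hd : l.drop b = c :: rest) :
    (l.drop a).take (b - a + 1) = (l.drop a).take (b - a) ++ [c] := by
  have hb : l[b]? = some c := by
    have h0 : (l.drop b)[0]? = some c := by rw [hd]; rfl
    rw [List.getElem?_drop] at h0
    simpa using h0
  rw [List.take_add_one]
  have : (l.drop a)[b - a]? = some c := by
    rw [List.getElem?_drop]
    rwa [Nat.add_sub_cancel' hab]
  simp [this]

-- structural equations for pvChecks
lemma pvChecks_nil (cs0 : List Char) : pvChecks cs0 [] = [] := by simp [pvChecks]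

lemma pvChecks_single (cs0 : List Char) (p : Int × Int) : pvChecks cs0 [p] = [] := by
  simp [pvChecks]

lemma pvChecks_cons₂ (cs0 : List Char) (p e : Int × Int) (ds : List (Int × Int)) :
    pvChecks cs0 (p :: e :: ds) =
      (if p.1 + e.1 = 10 then
        [PySem.Chars.count
          (PySem.List.slice cs0 (some (p.2 + 1)) (some e.2)) ['?'] == 3]
       else []) ++ pvChecks cs0 (e :: ds) := by
  simp only [pvChecks, List.zip_cons_cons, List.tail_cons, List.filter_cons]
  by_cases h : p.1 + e.1 = 10
  · rw [if_pos (by simpa using h), if_pos h]; simp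
  · rw [if_neg (by simpa using h), if_neg h]; simp

-- G: correspondence between B's pair checks and the pvQs of pvGaps, for a suffix of cs0
lemma checks_eq_qs (cs0 : List Char) : ∀ (cs : List Char) (s : Nat) (q : Int)
    (prev : Option (Int × Nat)),
    cs0.drop s = cs →
    (∀ v i, prev = some (v, i) →
      i < s ∧ ((((cs0.drop (i + 1)).take (s - i - 1)).count '?' : Int) = q)) →
    pvChecks cs0 ((prev.map (fun p => (p.1, (p.2 : Int)))).toList ++ pvDigits cs (s : Int)) =
      (pvQs (prev.map (·.1)) (pvGaps cs q)).map (· == 3) := by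
  intro cs
  induction cs with
  | nil =>
    intro s q prev hdrop hprev
    cases prev with
    | none => simp [pvDigits_nil, pvChecks_nil, pvGaps, pvQs]
    | some p => simp [pvDigits_nil, pvChecks_single, pvGaps, pvQs]
  | cons c cs ih =>
    intro s q prev hdrop hprev
    have hcast : ((s : Int) + 1) = ((s + 1 : Nat) : Int) := by push_cast; ring
    have hdrop' : cs0.drop (s + 1) = cs := by
      have := congrArg List.tail hdrop
      simpa [List.tail_drop] using this
    have hnextprev : ∀ v i, some (pvVal c, s) = some (v, i) →
        i < s + 1 ∧ ((((cs0.drop (i + 1)).take (s + 1 - i - 1)).count '?' : Int) = 0) := by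
      intro v i hvi
      injection hvi with hvi'
      have hi : i = s := (Prod.ext_iff.mp hvi').2.symm
      subst hi
      refine ⟨by omega, by simp⟩
    by_cases hd : PySem.Chars.isdigit c
    · rw [pvDigits_cons]
      simp only [hd, if_pos, hcast]
      have hrest := ih (s + 1) 0 (some (pvVal c, s)) hdrop' hnextprev
      simp only [Option.map_some, Option.toList_some, List.singleton_append] at hrest
      cases prev with
      | none =>
        simp only [Option.map_none, Option.toList_none, List.nil_append]
        simp only [pvGaps, hd, if_pos, pvQs] at *
        exact hrest
      | some p =>
        obtain ⟨v, i⟩ := p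
        obtain ⟨hlt, hcount⟩ := hprev v i rfl
        simp only [Option.map_some, Option.toList_some, List.singleton_append]
        rw [pvChecks_cons₂]
        have hslice : PySem.List.slice cs0 (some ((i : Int) + 1)) (some (s : Int)) =
            (cs0.drop (i + 1)).take (s - i - 1) := by
          have h1 : ((i : Int) + 1) = ((i + 1 : Nat) : Int) := by push_cast; ring
          rw [h1, PySem.List.slice_natCast, ← Nat.sub_sub]
        simp only [pvGaps, hd, if_pos, pvQs]
        by_cases h10 : v + pvVal c = 10
        · rw [if_pos h10, if_pos h10]
          simp only [List.map_cons, List.singleton_append]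
          refine List.cons_eq_cons.mpr ⟨?_, hrest⟩
          rw [hslice, count_single]
          have hq : q = ((((cs0.drop (i + 1)).take (s - i - 1)).count '?' : Nat) : Int) :=
            hcount.symm
          subst hq
          by_cases h3 : ((cs0.drop (i + 1)).take (s - i - 1)).count '?' = 3
          · rw [h3]; norm_num
          · have h3' : ((((cs0.drop (i + 1)).take (s - i - 1)).count '?' : Nat) : Int) ≠ 3 := by
              exact_mod_cast h3
            simp [h3, h3']
        · rw [if_neg h10, if_neg h10]
          simpa using hrest
    · -- not a digit: the digit list is unchanged, the gap counter possibly grows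
      rw [pvDigits_cons]
      rw [if_neg hd]
      simp only [hcast]
      have hstep : ∀ (q' : Int), (∀ v i, prev = some (v, i) →
          i < s + 1 ∧ ((((cs0.drop (i + 1)).take (s + 1 - i - 1)).count '?' : Int) = q')) →
          pvChecks cs0 ((prev.map (fun p => (p.1, (p.2 : Int)))).toList ++
              pvDigits cs ((s + 1 : Nat) : Int)) =
            (pvQs (prev.map (·.1)) (pvGaps cs q')).map (· == 3) := by
        intro q' h'
        exact ih (s + 1) q' prev hdrop' h'
      by_cases hq : c = '?'
      · rw [show pvGaps (c :: cs) q = pvGaps cs (q + 1) by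
          subst hq; simp [pvGaps, (by decide : PySem.Chars.isdigit '?' = false)]]
        refine hstep (q + 1) ?_
        intro v i hvi
        obtain ⟨hlt, hcount⟩ := hprev v i hvi
        refine ⟨by omega, ?_⟩
        have hext := take_extend cs0 cs (i + 1) s c (by omega) hdrop
        rw [show s + 1 - i - 1 = s - (i + 1) + 1 by omega, hext]
        rw [show s - (i + 1) = s - i - 1 by omega]
        rw [List.count_append]
        subst hq
        rw [show List.count '?' ['?'] = 1 from by decide]
        push_cast
        omega
      · rw [show pvGaps (c :: cs) q = pvGaps cs q by simp [pvGaps, hd, hq]]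
        refine hstep q ?_
        intro v i hvi
        obtain ⟨hlt, hcount⟩ := hprev v i hvi
        refine ⟨by omega, ?_⟩
        have hext := take_extend cs0 cs (i + 1) s c (by omega) hdrop
        rw [show s + 1 - i - 1 = s - (i + 1) + 1 by omega, hext]
        rw [show s - (i + 1) = s - i - 1 by omega]
        rw [List.count_append]
        have : List.count '?' [c] = 0 := by simp [hq]
        rw [this]
        simpa using hcount

-- ===== VERDICT (by name: the statement is the Claim_ definition above) =====
theorem QuestionsMarks_spec : Claim_equal_QuestionsMarks := by
  intro strParam _
  unfold Spec_QuestionsMarks QuestionsMarks QuestionsMarks_alt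
  rw [loop_eq_check, check_eq_qs]
  have hmain := checks_eq_qs strParam.toList strParam.toList 0 0 none rfl
    (by intro v i h; cases h)
  simp only [Option.map_none, Option.toList_none, List.nil_append, Nat.cast_zero] at hmain
  show _ = (if !(pvChecks strParam.toList (pvDigits strParam.toList 0)).isEmpty &&
      (pvChecks strParam.toList (pvDigits strParam.toList 0)).all id then "true" else "false")
  rw [hmain]
  simp [List.all_map]
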